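-- pv_equiv track=rewrite | github.com/couchds/abigail | scripts/obo_to_csv.py | line_requires_direct_extraction
-- ===== SOURCE A (Python) =====
-- def line_requires_direct_extraction(line):
--     """ The value extracted from these tags are simply the value itself.
--
--     Params:
--     @line (str): The line of the file that is being processed
--     """
--     DIRECT_EXTRACTION_TAGS = (
--         "id",
--         "name",
--         "def",
--         "namespace"
--     )
--     for tag in DIRECT_EXTRACTION_TAGS:
--         if line.startswith(f'{tag}:'):
--             return True
--     return False
-- ===== SOURCE B (Python) =====
-- def line_requires_direct_extraction(line):
--     """ The value extracted from these tags are simply the value itself.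
--
--     Params:
--     @line (str): The line of the file that is being processed
--     """
--     # Single pass over the characters, advancing all patterns simultaneously:
--     # keep the suffixes of the patterns that are still alive; accept as soon as
--     # one pattern is fully consumed.
--     alive = ("id:", "name:", "def:", "namespace:")
--     for ch in line:
--         alive = tuple(t[1:] for t in alive if t[0] == ch)
--         if "" in alive:
--             return True
--         if not alive:
--             return False
--     return False
-- ===== Notes on version B (the rewrite author's own statement) =====
-- stated objective: alternative
-- what changed: B replaces A's loop of four independent startswith scans with a single character-by-character pass that advances all patterns simultaneously (maintaining the set of still-alive pattern suffixes, automaton-style) and decides as soon as a pattern is consumed or no candidate survives.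
import Mathlib
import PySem

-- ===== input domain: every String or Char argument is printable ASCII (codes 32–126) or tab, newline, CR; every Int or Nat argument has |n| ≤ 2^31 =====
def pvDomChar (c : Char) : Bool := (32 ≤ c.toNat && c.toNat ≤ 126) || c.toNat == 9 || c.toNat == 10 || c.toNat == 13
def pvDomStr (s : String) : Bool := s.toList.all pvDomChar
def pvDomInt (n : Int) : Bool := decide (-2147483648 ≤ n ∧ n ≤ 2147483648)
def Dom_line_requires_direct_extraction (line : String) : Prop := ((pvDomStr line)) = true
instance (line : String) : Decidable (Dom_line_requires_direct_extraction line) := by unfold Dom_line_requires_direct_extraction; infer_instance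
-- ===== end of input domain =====

-- B replaces A's four separate startswith scans with one character-by-character pass
-- that narrows the set of still-alive pattern suffixes (simultaneous multi-pattern match).


-- ===== PORT A =====
-- the tuple DIRECT_EXTRACTION_TAGS
def pvTagsA : List String := ["id", "name", "def", "namespace"]

-- the 'for tag in DIRECT_EXTRACTION_TAGS: if line.startswith(f'{tag}:'): return True' loop
def pvLoopA (line : String) : List String → Bool
  | [] => false
  | tag :: rest =>
      if PySem.Str.startswith line (tag ++ ":") then true else pvLoopA line rest

def line_requires_direct_extraction (line : String) : Bool :=
  pvLoopA line pvTagsA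

-- ===== PORT B =====
-- the 'for ch in line' loop: narrow the alive suffixes per character
def pvWalkB : List Char → List (List Char) → Bool
  | [], _ => false
  | ch :: rest, alive =>
      let alive' := (alive.filter (fun t => t.head? == some ch)).map List.tail
      if alive'.contains ([] : List Char) then true
      else if alive'.isEmpty then false
      else pvWalkB rest alive'

def pvAliveB : List (List Char) :=
  ["id:".toList, "name:".toList, "def:".toList, "namespace:".toList]

def line_requires_direct_extraction_alt (line : String) : Bool :=
  pvWalkB line.toList pvAliveB

-- ===== PRECONDITION & SPEC =====
def Spec_line_requires_direct_extraction (line : String) (out : Bool) : Prop := out = line_requires_direct_extraction_alt line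
instance (line : String) (out : Bool) : Decidable (Spec_line_requires_direct_extraction line out) := by unfold Spec_line_requires_direct_extraction; infer_instance

-- ===== CLAIM (what is proved, stated in full; the proofs are below) =====
def Claim_equal_line_requires_direct_extraction : Prop := ∀ (line : String), Dom_line_requires_direct_extraction line → Spec_line_requires_direct_extraction line (line_requires_direct_extraction line)

-- ===== LEMMAS AND PROOFS =====

-- B's walk computes "some alive pattern is a prefix of the remaining characters",
-- provided no alive pattern is already empty.
lemma pvWalkB_eq_any (chars : List Char) : ∀ alive : List (List Char), ([] : List Char) ∉ alive →
    pvWalkB chars alive = alive.any (fun t => decide (t <+: chars)) := by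
  induction chars with
  | nil =>
      intro alive hne
      simp only [pvWalkB]
      symm
      simp only [List.any_eq_false, decide_eq_true_eq, List.prefix_nil]
      intro t ht h
      exact hne (h ▸ ht)
  | cons ch rest ih =>
      intro alive hne
      have hstep : ((alive.filter (fun t => t.head? == some ch)).map List.tail).any
          (fun t => decide (t <+: rest)) = alive.any (fun t => decide (t <+: ch :: rest)) := by
        rw [Bool.eq_iff_iff]
        simp only [List.any_eq_true, List.mem_map, List.mem_filter, decide_eq_true_eq,
          beq_iff_eq]
        constructor
        · rintro ⟨t, ⟨u, ⟨hu, hh⟩, rfl⟩, hp⟩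
          match u with
          | [] => exact absurd hu hne
          | c :: ts =>
            have hcch : c = ch := by simpa using hh
            rcases hp with ⟨r, hr⟩
            refine ⟨c :: ts, hu, ⟨r, ?_⟩⟩
            simp only [List.cons_append, List.cons.injEq]
            exact ⟨hcch, by simpa using hr⟩
        · rintro ⟨u, hu, hp⟩
          match u with
          | [] => exact absurd hu hne
          | c :: ts =>
            rcases hp with ⟨r, hr⟩
            simp only [List.cons_append, List.cons.injEq] at hr
            exact ⟨ts, ⟨c :: ts, ⟨hu, by simp [hr.1]⟩, rfl⟩, ⟨r, hr.2⟩⟩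
      simp only [pvWalkB]
      set alive' := (alive.filter (fun t => t.head? == some ch)).map List.tail with halive'
      by_cases hc : alive'.contains ([] : List Char) = true
      · rw [if_pos hc]
        symm
        rw [← hstep]
        simp only [List.any_eq_true]
        exact ⟨[], List.contains_iff_mem.mp hc, by simp⟩
      · rw [if_neg hc]
        by_cases he : alive'.isEmpty = true
        · rw [if_pos he, ← hstep]
          simp [List.isEmpty_iff.mp he]
        · rw [if_neg he, ih alive' (fun h => hc (List.contains_iff_mem.mpr h)), hstep]

-- ===== VERDICT (by name: the statement is the Claim_ definition above) =====
theorem line_requires_direct_extraction_spec : Claim_equal_line_requires_direct_extraction := by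
  intro line _
  unfold Spec_line_requires_direct_extraction
  unfold line_requires_direct_extraction line_requires_direct_extraction_alt
  rw [pvWalkB_eq_any line.toList pvAliveB (by decide)]
  have hsw : ∀ tag : String, PySem.Str.startswith line (tag ++ ":")
      = decide ((tag ++ ":").toList <+: line.toList) := by
    intro tag
    simp only [PySem.Str.startswith]
    rw [Bool.eq_iff_iff]
    simp [PySem.Chars.startswith_iff]
  simp only [pvLoopA, pvTagsA, pvAliveB, List.any_cons, List.any_nil, hsw]
  have h : ∀ s : String, ("id:".toList <+: s.toList → s = s) := fun _ _ => rfl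
  cases h1 : decide (("id:").toList <+: line.toList) <;>
  cases h2 : decide (("name:").toList <+: line.toList) <;>
  cases h3 : decide (("def:").toList <+: line.toList) <;>
  cases h4 : decide (("namespace:").toList <+: line.toList) <;>
    simp_all [String.toList_append]
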